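-- pv_equiv track=rewrite | github.com/pranavalavandi/Qcomp-function-optimization | objective_function.py | subclause_1
-- ===== SOURCE A (Python) =====
-- def qubit(b):
--     return 1-2*b
--
-- def subclause_1(strings):
--     results = []
--
--     for i in range(len(strings)):
--         sum  = 0
--         for j in range(len(strings[i])-1):
--             sum += qubit(strings[i][j])*qubit(strings[i][j+1])
--
--         results.append(sum)
--
--     for i in range(len(strings)):
--         sum  = 0
--         for j in range(len(strings[i])-2):
--             sum += -qubit(strings[i][j])*qubit(strings[i][j+2])
--
--         results[i] += sum
--
--     return results
-- ===== SOURCE B (Python) =====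
-- def qubit(b):
--     return 1-2*b
--
-- def subclause_1(strings):
--     results = []
--     for s in strings:
--         n = len(s)
--         total = 0
--         for j in range(n):
--             if j < n-1:
--                 total += qubit(s[j])*qubit(s[j+1])
--             if j < n-2:
--                 total -= qubit(s[j])*qubit(s[j+2])
--         results.append(total)
--     return results
-- ===== Notes on version B (the rewrite author's own statement) =====
-- stated objective: simpler
-- what changed: One single pass per string with one fused accumulator (adding the neighbor product and subtracting the skip-one product in the same loop) replaces A's two separate full passes over the whole list with an intermediate results list that is mutated afterwards.
import Mathlib
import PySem

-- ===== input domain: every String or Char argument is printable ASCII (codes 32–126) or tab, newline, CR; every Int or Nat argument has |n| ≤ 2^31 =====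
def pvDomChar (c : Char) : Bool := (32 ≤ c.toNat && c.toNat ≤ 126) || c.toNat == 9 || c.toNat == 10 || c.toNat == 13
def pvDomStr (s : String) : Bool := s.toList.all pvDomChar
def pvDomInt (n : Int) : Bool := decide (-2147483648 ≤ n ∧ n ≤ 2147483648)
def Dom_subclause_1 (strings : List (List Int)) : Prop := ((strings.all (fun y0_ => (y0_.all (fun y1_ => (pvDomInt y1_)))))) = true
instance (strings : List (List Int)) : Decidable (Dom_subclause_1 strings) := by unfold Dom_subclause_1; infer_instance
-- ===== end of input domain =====

-- B fuses A's two full passes (neighbor products, then skip-one products with a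
-- second mutating pass over results) into one single pass per string with one
-- accumulator; objective: simpler.

-- ===== PORT A =====
def qubit (b : Int) : Int := 1 - 2 * b

def subclause_1 (strings : List (List Int)) : List Int :=
  -- first loop: build results with the neighbor-product sums
  let results := (List.range strings.length).foldl (fun results i =>
    let s := strings.getD i []
    let sum := (List.range (s.length - 1)).foldl
      (fun sum j => sum + qubit (s.getD j 0) * qubit (s.getD (j+1) 0)) 0
    results ++ [sum]) []
  -- second loop: results[i] += skip-one sum
  (List.range strings.length).foldl (fun results i =>
    let s := strings.getD i []
    let sum := (List.range (s.length - 2)).foldl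
      (fun sum j => sum + (-qubit (s.getD j 0)) * qubit (s.getD (j+2) 0)) 0
    results.modify i (fun x => x + sum)) results

-- ===== PORT B =====
def subclause_1_alt (strings : List (List Int)) : List Int :=
  strings.map (fun s =>
    let n := s.length
    (List.range n).foldl (fun total j =>
      let total := if j < n - 1 then total + qubit (s.getD j 0) * qubit (s.getD (j+1) 0) else total
      if j < n - 2 then total - qubit (s.getD j 0) * qubit (s.getD (j+2) 0) else total) 0)

-- ===== PRECONDITION & SPEC =====
def Spec_subclause_1 (strings : List (List Int)) (out : List Int) : Prop := out = subclause_1_alt strings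
instance (strings : List (List Int)) (out : List Int) : Decidable (Spec_subclause_1 strings out) := by unfold Spec_subclause_1; infer_instance

-- ===== CLAIM (what is proved, stated in full; the proofs are below) =====
def Claim_equal_subclause_1 : Prop := ∀ (strings : List (List Int)), Dom_subclause_1 strings → Spec_subclause_1 strings (subclause_1 strings)

-- ===== LEMMAS AND PROOFS =====

-- a foldl that only accumulates a sum is the sum of a map
theorem foldl_add_map (f : Nat → Int) (l : List Nat) (a : Int) :
    l.foldl (fun acc j => acc + f j) a = a + (l.map f).sum := by
  induction l generalizing a with
  | nil => simp
  | cons x xs ih => simp [List.foldl_cons, ih (a + f x)]; ring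

-- pointwise-equal step functions give equal folds
theorem foldl_congr_fun {α β : Type} (f g : α → β → α) (l : List β) (a : α)
    (h : ∀ a x, f a x = g a x) : l.foldl f a = l.foldl g a := by
  induction l generalizing a with
  | nil => rfl
  | cons x xs ih => simp [List.foldl_cons, h, ih]

-- summing a guarded function over range n equals summing over range m (m ≤ n)
theorem sum_range_ite (f : Nat → Int) (m n : Nat) (h : m ≤ n) :
    ((List.range n).map (fun j => if j < m then f j else 0)).sum
      = ((List.range m).map f).sum := by
  obtain ⟨k, rfl⟩ := Nat.exists_eq_add_of_le h
  rw [List.range_add, List.map_append, List.sum_append]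
  have h1 : ((List.range m).map (fun j => if j < m then f j else 0)) = (List.range m).map f := by
    apply List.map_congr_left
    intro j hj
    simp [List.mem_range.mp hj]
  have h2 : (((List.range k).map (fun j => m + j)).map (fun j => if j < m then f j else 0)).sum = 0 := by
    apply List.sum_eq_zero
    intro x hx
    simp only [List.mem_map] at hx
    obtain ⟨j, hj, rfl⟩ := hx
    obtain ⟨i, _, rfl⟩ := hj
    simp [Nat.not_lt.mpr (Nat.le_add_right m i)]
  rw [h1, h2, add_zero]

-- per-string: B's fused single pass equals A's two sums
theorem fused_eq (s : List Int) :
    (List.range s.length).foldl (fun total j =>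
      let total := if j < s.length - 1 then total + qubit (s.getD j 0) * qubit (s.getD (j+1) 0) else total
      if j < s.length - 2 then total - qubit (s.getD j 0) * qubit (s.getD (j+2) 0) else total) 0
    = (List.range (s.length - 1)).foldl
        (fun sum j => sum + qubit (s.getD j 0) * qubit (s.getD (j+1) 0)) 0
      + (List.range (s.length - 2)).foldl
        (fun sum j => sum + (-qubit (s.getD j 0)) * qubit (s.getD (j+2) 0)) 0 := by
  set n := s.length with hn
  set f : Nat → Int := fun j => qubit (s.getD j 0) * qubit (s.getD (j+1) 0) with hf
  set g : Nat → Int := fun j => (-qubit (s.getD j 0)) * qubit (s.getD (j+2) 0) with hg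
  have hstep : ∀ (a : Int) (j : Nat),
      (let total := if j < n - 1 then a + qubit (s.getD j 0) * qubit (s.getD (j+1) 0) else a
       if j < n - 2 then total - qubit (s.getD j 0) * qubit (s.getD (j+2) 0) else total)
      = a + ((fun j => (if j < n - 1 then f j else 0) + (if j < n - 2 then g j else 0)) j) := by
    intro a j
    simp only [hf, hg]
    split_ifs <;> ring
  rw [foldl_congr_fun _ _ _ _ hstep]
  rw [foldl_add_map, foldl_add_map, foldl_add_map]
  have : ((List.range n).map (fun j => (if j < n - 1 then f j else 0) + (if j < n - 2 then g j else 0))).sum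
      = ((List.range n).map (fun j => if j < n - 1 then f j else 0)).sum
        + ((List.range n).map (fun j => if j < n - 2 then g j else 0)).sum := by
    induction (List.range n) with
    | nil => simp
    | cons x xs ih => simp [ih]; ring
  rw [this, sum_range_ite f (n-1) n (Nat.sub_le n 1), sum_range_ite g (n-2) n (Nat.sub_le n 2)]
  simp [hf, hg, List.getD, neg_mul]

-- A's first loop builds the map of per-string neighbor sums
theorem build_eq (h : List Int → Int) :
    ∀ (l : List (List Int)) (acc : List Int) (n : Nat), n ≤ l.length →
    (List.range n).foldl (fun res i => res ++ [h (l.getD i [])]) acc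
      = acc ++ (l.take n).map h := by
  intro l acc n
  induction n generalizing acc with
  | zero => simp
  | succ k ih =>
    intro hk
    rw [List.range_succ, List.foldl_append]
    rw [ih acc (Nat.le_of_succ_le hk)]
    simp only [List.foldl_cons, List.foldl_nil]
    have hlt : k < l.length := hk
    have hstep : List.take (k+1) (List.map h l) = List.take k (List.map h l) ++ [h l[k]] := by
      rw [List.take_add_one]
      simp [List.getElem?_eq_getElem, hlt]
    rw [List.getD_eq_getElem l [] hlt, List.map_take, List.map_take, hstep, List.append_assoc]

-- A's second loop adds t i to slot i, for every slot
theorem modify_fold_eq (t : Nat → Int) :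
    ∀ (n : Nat) (l : List Int),
    (List.range n).foldl (fun res i => res.modify i (fun x => x + t i)) l
      = l.mapIdx (fun i x => if i < n then x + t i else x) := by
  intro n
  induction n with
  | zero =>
    intro l
    simp only [List.range_zero, List.foldl_nil, Nat.not_lt_zero, if_false]
    rw [List.mapIdx_eq_zipIdx_map]
    simp
  | succ k ih =>
    intro l
    rw [List.range_succ, List.foldl_append, ih l]
    simp only [List.foldl_cons, List.foldl_nil]
    apply List.ext_getElem
    · simp
    · intro i h1 h2
      simp only [List.getElem_modify, List.getElem_mapIdx] at *
      rcases Nat.lt_trichotomy i k with h | h | h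
      · simp [Nat.ne_of_gt h, h, Nat.lt_succ_of_lt h]
      · subst h
        simp
      · simp [Nat.ne_of_lt h, Nat.not_lt.mpr (Nat.le_of_lt h), Nat.not_lt.mpr h]

-- ===== VERDICT (by name: the statement is the Claim_ definition above) =====
theorem subclause_1_spec : Claim_equal_subclause_1 := by
  intro strings _
  unfold Spec_subclause_1 subclause_1 subclause_1_alt
  have hb := build_eq (fun s => (List.range (s.length - 1)).foldl
      (fun sum j => sum + qubit (s.getD j 0) * qubit (s.getD (j+1) 0)) 0)
      strings [] strings.length (Nat.le_refl _)
  simp only [List.take_length, List.nil_append] at hb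
  have hm := modify_fold_eq (fun i => (List.range ((strings.getD i []).length - 2)).foldl
      (fun sum j => sum + (-qubit ((strings.getD i []).getD j 0)) * qubit ((strings.getD i []).getD (j+2) 0)) 0)
      strings.length (strings.map (fun s => (List.range (s.length - 1)).foldl
      (fun sum j => sum + qubit (s.getD j 0) * qubit (s.getD (j+1) 0)) 0))
  simp only [hb, hm]
  apply List.ext_getElem
  · simp
  · intro i h1 h2
    have hi : i < strings.length := by simpa using h2
    simp only [List.getElem_mapIdx, List.getElem_map]
    rw [List.getD_eq_getElem strings [] hi, if_pos hi]
    exact (fused_eq strings[i]).symm
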